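-- pv_equiv track=rewrite | github.com/poc-effectiveness/PoCAdaptation | Script/step.py | count_reproduction_after_adaptation
-- ===== SOURCE A (Python) =====
-- def count_reproduction_after_adaptation(log_text: str, cve_id: str, version: str) -> int:
--     # 只从包含目标 version 的 Start adapting 行之后开始统计
--     start_marker = "[Adapter] Start adapting exploit from"
--     exec_pattern = f"[Executor] Executing exploit for {cve_id} on version {version}..."
--
--     lines = log_text.splitlines()
--     start_index = None
--
--     for i, line in enumerate(lines):
--         if start_marker in line and version in line:
--             start_index = i
--             break
--
--     if start_index is None:
--         return 0
--
--     # 只统计 adaptation 后的内容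
--     cropped_lines = lines[start_index:]
--     cropped_log = "\n".join(cropped_lines)
--     count = cropped_log.count(exec_pattern)
--
--     return max(0, count - 1)
-- ===== SOURCE B (Python) =====
-- def count_reproduction_after_adaptation(log_text: str, cve_id: str, version: str) -> int:
--     start_marker = "[Adapter] Start adapting exploit from"
--     exec_pattern = f"[Executor] Executing exploit for {cve_id} on version {version}..."
--     # Back-to-front scan: keep a running suffix total of per-line pattern counts;
--     # whenever a start line is met, snapshot the suffix total (the last snapshot,
--     # i.e. the earliest start line in forward order, wins).
--     suffix = 0
--     best = None
--     for line in reversed(log_text.splitlines()):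
--         suffix += line.count(exec_pattern)
--         if start_marker in line and version in line:
--             best = suffix
--     return 0 if best is None else max(0, best - 1)
-- ===== Notes on version B (the rewrite author's own statement) =====
-- stated objective: alternative
-- what changed: Instead of A's forward search for the start line followed by slice, '\n'.join and a count over the rejoined text, B scans the lines back-to-front once, maintaining a running suffix total of per-line pattern counts and snapshotting that total at every start line it meets, so the last snapshot (the forward-first start line) is the answer; no index, slice or rejoin exists in B.
import Mathlib
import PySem

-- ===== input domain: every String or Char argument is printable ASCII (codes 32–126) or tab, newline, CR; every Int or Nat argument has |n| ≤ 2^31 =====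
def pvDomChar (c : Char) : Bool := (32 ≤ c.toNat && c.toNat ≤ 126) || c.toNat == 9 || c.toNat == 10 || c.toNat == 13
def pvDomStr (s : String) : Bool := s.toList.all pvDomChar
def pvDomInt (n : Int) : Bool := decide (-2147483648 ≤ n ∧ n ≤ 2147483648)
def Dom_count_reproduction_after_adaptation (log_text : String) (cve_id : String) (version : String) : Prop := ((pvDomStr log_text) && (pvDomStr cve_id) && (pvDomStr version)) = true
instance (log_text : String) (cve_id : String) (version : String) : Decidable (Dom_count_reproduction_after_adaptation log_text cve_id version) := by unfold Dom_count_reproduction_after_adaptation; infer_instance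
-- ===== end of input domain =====

-- B replaces A's find-start-index / slice / '\n'-join / count-on-joined-text pipeline by a single
-- back-to-front scan keeping a suffix total of per-line counts, snapshotted at start lines
-- (alternative decomposition, same cost; return value only).

-- ===== PORT A =====
-- the 'for i, line in enumerate(lines): … break' search for the start line
def pvFindStart (start_marker version : String) (lines : List String) (i : Nat) : Option Nat :=
  match lines with
  | [] => none
  | line :: rest =>
    if PySem.Str.isIn start_marker line && PySem.Str.isIn version line then some i
    else pvFindStart start_marker version rest (i + 1)

def count_reproduction_after_adaptation (log_text : String) (cve_id : String) (version : String) : Int :=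
  let start_marker : String := "[Adapter] Start adapting exploit from"
  let exec_pattern : String := "[Executor] Executing exploit for " ++ cve_id ++ " on version " ++ version ++ "..."
  let lines := PySem.Str.splitlines log_text
  match pvFindStart start_marker version lines 0 with
  | none => 0
  | some start_index =>
    let cropped_lines := PySem.List.slice lines (some (start_index : Int)) none
    let cropped_log := PySem.Str.join "\n" cropped_lines
    let count := PySem.Str.count cropped_log exec_pattern
    max 0 ((count : Int) - 1)

-- ===== PORT B =====
-- B's loop body over the reversed lines: (suffix total, best snapshot)
def pvRevStep (start_marker exec_pattern version : String) (s : Int × Option Int) (line : String) : Int × Option Int :=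
  let suffix := s.1 + (PySem.Str.count line exec_pattern : Int)
  (suffix, if PySem.Str.isIn start_marker line && PySem.Str.isIn version line then some suffix else s.2)

def count_reproduction_after_adaptation_alt (log_text : String) (cve_id : String) (version : String) : Int :=
  let start_marker : String := "[Adapter] Start adapting exploit from"
  let exec_pattern : String := "[Executor] Executing exploit for " ++ cve_id ++ " on version " ++ version ++ "..."
  let st := (PySem.Str.splitlines log_text).reverse.foldl (pvRevStep start_marker exec_pattern version) (0, none)
  match st.2 with
  | none => 0
  | some b => max 0 (b - 1)

-- ===== PRECONDITION & SPEC =====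
-- Pre_ excludes cve_id containing a newline: there the exec pattern spans two lines, so A's
-- join-then-count can match across a line boundary while any per-line count cannot — a corner
-- no real CVE id reaches, and on which both values are accidents of the representation.
def Pre_count_reproduction_after_adaptation (log_text : String) (cve_id : String) (version : String) : Prop :=
  '\n' ∉ cve_id.toList
instance (log_text : String) (cve_id : String) (version : String) : Decidable (Pre_count_reproduction_after_adaptation log_text cve_id version) := by unfold Pre_count_reproduction_after_adaptation; infer_instance

def pvWitness_count_reproduction_after_adaptation : String × String × String :=
  ("[Adapter] Start adapting exploit from x v1\n[Executor] Executing exploit for C-1 on version v1...", "C-1", "v1")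

def Spec_count_reproduction_after_adaptation (log_text : String) (cve_id : String) (version : String) (out : Int) : Prop := out = count_reproduction_after_adaptation_alt log_text cve_id version
instance (log_text : String) (cve_id : String) (version : String) (out : Int) : Decidable (Spec_count_reproduction_after_adaptation log_text cve_id version out) := by unfold Spec_count_reproduction_after_adaptation; infer_instance

-- ===== CLAIM (what is proved, stated in full; the proofs are below) =====
def Claim_equal_count_reproduction_after_adaptation : Prop := ∀ (log_text : String) (cve_id : String) (version : String), Dom_count_reproduction_after_adaptation log_text cve_id version → Pre_count_reproduction_after_adaptation log_text cve_id version → Spec_count_reproduction_after_adaptation log_text cve_id version (count_reproduction_after_adaptation log_text cve_id version)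

-- ===== LEMMAS AND PROOFS =====

-- structural (fuel-free) version of Python's non-overlapping substring count
def pvCnt (sub : List Char) (s : List Char) : Nat :=
  match s with
  | [] => 0
  | c :: t =>
    if h : sub ≠ [] ∧ sub <+: (c :: t) then pvCnt sub (List.drop sub.length (c :: t)) + 1
    else pvCnt sub t
termination_by s.length
decreasing_by
  · have h1 : 0 < sub.length := List.length_pos_iff.mpr h.1
    simp only [List.length_drop, List.length_cons]
    omega
  · simp

theorem pvCnt_cons (sub : List Char) (c : Char) (t : List Char) :
    pvCnt sub (c :: t)
      = if h : sub ≠ [] ∧ sub <+: (c :: t) then pvCnt sub (List.drop sub.length (c :: t)) + 1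
        else pvCnt sub t := by
  rw [pvCnt]

theorem pvCnt_nil_sub (s : List Char) : pvCnt [] s = 0 := by
  induction s with
  | nil => rw [pvCnt]
  | cons c t ih => rw [pvCnt]; simp [ih]

theorem cgo_nil (sub : List Char) (f acc : Nat) : PySem.Chars.count.go sub f [] acc = acc := by
  cases f <;> simp [PySem.Chars.count.go]

theorem cgo_cons (sub : List Char) (f : Nat) (c : Char) (t : List Char) (acc : Nat) :
    PySem.Chars.count.go sub (f + 1) (c :: t) acc =
      (if sub.isPrefixOf (c :: t) then PySem.Chars.count.go sub f (List.drop sub.length (c :: t)) (acc + 1)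
       else PySem.Chars.count.go sub f t acc) := by
  simp [PySem.Chars.count.go]

theorem cgo_eq (sub : List Char) (hsub : sub ≠ []) :
    ∀ (f : Nat) (s : List Char) (acc : Nat), s.length ≤ f →
      PySem.Chars.count.go sub f s acc = acc + pvCnt sub s := by
  intro f
  induction f with
  | zero =>
    intro s acc hle
    have : s = [] := List.eq_nil_of_length_eq_zero (Nat.le_zero.mp hle)
    subst this
    rw [cgo_nil, pvCnt]
    simp
  | succ f ih =>
    intro s acc hle
    cases s with
    | nil => rw [cgo_nil, pvCnt]; simp
    | cons c t =>
      have hlen : 0 < sub.length := List.length_pos_iff.mpr hsub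
      rw [cgo_cons]
      by_cases hp : sub.isPrefixOf (c :: t) = true
      · rw [if_pos hp]
        have hdl : (List.drop sub.length (c :: t)).length ≤ f := by
          simp only [List.length_drop, List.length_cons]
          simp only [List.length_cons] at hle
          omega
        rw [ih _ _ hdl]
        rw [pvCnt, dif_pos ⟨hsub, List.isPrefixOf_iff_prefix.mp hp⟩]
        omega
      · rw [if_neg hp]
        have htl : t.length ≤ f := by simp only [List.length_cons] at hle; omega
        rw [ih _ _ htl]
        rw [pvCnt, dif_neg (fun h => hp (List.isPrefixOf_iff_prefix.mpr h.2))]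

theorem count_eq_pvCnt (s sub : List Char) (hsub : sub ≠ []) :
    PySem.Chars.count s sub = pvCnt sub s := by
  rw [PySem.Chars.count]
  rw [if_neg (by simpa using hsub)]
  simpa using cgo_eq sub hsub s.length s 0 le_rfl

theorem pvCnt_newline_cons (sub rest : List Char) (hnl : '\n' ∉ sub) :
    pvCnt sub ('\n' :: rest) = pvCnt sub rest := by
  rw [pvCnt]
  rw [dif_neg]
  rintro ⟨hne, hp⟩
  cases sub with
  | nil => exact hne rfl
  | cons a s' =>
    rcases hp with ⟨tl, htl⟩
    injection htl with h1 _
    exact hnl (by simp [h1])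

theorem pvCnt_append (sub : List Char) (hnl : '\n' ∉ sub) :
    ∀ (n : Nat) (l rest : List Char), l.length ≤ n → '\n' ∉ l →
      pvCnt sub (l ++ '\n' :: rest) = pvCnt sub l + pvCnt sub rest := by
  intro n
  induction n with
  | zero =>
    intro l rest hle _
    have : l = [] := List.eq_nil_of_length_eq_zero (Nat.le_zero.mp hle)
    subst this
    by_cases hsub : sub = []
    · subst hsub; simp [pvCnt_nil_sub]
    · rw [List.nil_append, pvCnt_newline_cons sub rest hnl, pvCnt]
      simp
  | succ n ih =>
    intro l rest hle hlnl
    cases l with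
    | nil =>
      rw [List.nil_append, pvCnt_newline_cons sub rest hnl, pvCnt]
      simp
    | cons c t =>
      by_cases hsub : sub = []
      · subst hsub; simp [pvCnt_nil_sub]
      · have hlen : 0 < sub.length := List.length_pos_iff.mpr hsub
        -- the prefix test agrees on both sides of the '\n'
        have hiff : sub <+: ((c :: t) ++ '\n' :: rest) ↔ sub <+: (c :: t) := by
          constructor
          · intro hp2
            by_cases hle2 : sub.length ≤ (c :: t).length
            · exact List.prefix_of_prefix_length_le hp2 (List.prefix_append _ _) hle2
            · push_neg at hle2
              have hlp : (c :: t) <+: sub :=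
                List.prefix_of_prefix_length_le (List.prefix_append _ _) hp2 (le_of_lt hle2)
              rcases hlp with ⟨tl, htl⟩
              have htlne : tl ≠ [] := by
                intro h; subst h
                rw [← htl] at hle2
                simp at hle2
              have htlp : tl <+: ('\n' :: rest) := by
                have h4 : (c :: t) ++ tl <+: (c :: t) ++ '\n' :: rest := by
                  rw [htl]; exact hp2
                exact (List.prefix_append_right_inj _).mp h4
              have hmem : '\n' ∈ tl := by
                cases tl with
                | nil => exact absurd rfl htlne
                | cons a tl' =>
                  rcases htlp with ⟨u, hu⟩
                  injection hu with h1 _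
                  simp [h1]
              exact absurd (by rw [← htl]; exact List.mem_append_right _ hmem) hnl
          · intro hp
            exact hp.trans (List.prefix_append _ _)
        simp only [List.cons_append]
        rw [pvCnt_cons sub c (t ++ '\n' :: rest), pvCnt_cons sub c t]
        by_cases hp : sub <+: (c :: t)
        · rw [dif_pos ⟨hsub, hiff.mpr hp⟩, dif_pos ⟨hsub, hp⟩]
          have hklen : sub.length ≤ (c :: t).length := hp.length_le
          have hdrop : List.drop sub.length ((c :: t) ++ '\n' :: rest)
              = List.drop sub.length (c :: t) ++ '\n' :: rest :=
            List.drop_append_of_le_length hklen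
          simp only [List.cons_append] at hdrop
          rw [hdrop]
          have hdl : (List.drop sub.length (c :: t)).length ≤ n := by
            simp only [List.length_drop, List.length_cons]
            simp only [List.length_cons] at hle
            omega
          have hdnl : '\n' ∉ List.drop sub.length (c :: t) := fun h =>
            hlnl (List.mem_of_mem_drop h)
          rw [ih (List.drop sub.length (c :: t)) rest hdl hdnl]
          omega
        · rw [dif_neg (fun h => hp (hiff.mp h.2)),
              dif_neg (fun h => hp h.2)]
          have htn : t.length ≤ n := by simp only [List.length_cons] at hle; omega
          exact ih t rest htn (fun h => hlnl (List.mem_cons_of_mem _ h))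

theorem pvCnt_join (sub : List Char) (hnl : '\n' ∉ sub) :
    ∀ ls : List (List Char), (∀ l ∈ ls, '\n' ∉ l) →
      pvCnt sub (PySem.Chars.join ['\n'] ls) = (ls.map (pvCnt sub)).sum := by
  intro ls
  induction ls with
  | nil =>
    intro _
    rw [show PySem.Chars.join ['\n'] [] = [] from rfl, pvCnt]
    simp
  | cons a t ih =>
    intro hfree
    cases t with
    | nil => simp [PySem.Chars.join, List.intercalate]
    | cons b t' =>
      have hjoin : PySem.Chars.join ['\n'] (a :: b :: t') = a ++ '\n' :: PySem.Chars.join ['\n'] (b :: t') := by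
        simp [PySem.Chars.join, List.intercalate, List.intersperse]
      rw [hjoin]
      rw [pvCnt_append sub hnl a.length a _ le_rfl (hfree a (by simp))]
      rw [ih (fun l hl => hfree l (List.mem_cons_of_mem _ hl))]
      simp

-- per-line sum form of A's count over the joined text
theorem count_join_eq_sum (pat : String) (hpat0 : pat.toList ≠ []) (hnl : '\n' ∉ pat.toList) :
    ∀ ls : List String, (∀ l ∈ ls, '\n' ∉ l.toList) →
      (PySem.Str.count (PySem.Str.join "\n" ls) pat : Int)
        = (ls.map (fun l => (PySem.Str.count l pat : Int))).sum := by
  intro ls hfree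
  rw [PySem.Str.count_eq, PySem.Str.toList_join]
  have hsep : ("\n" : String).toList = ['\n'] := by decide
  rw [hsep, count_eq_pvCnt _ _ hpat0]
  rw [pvCnt_join pat.toList hnl (ls.map String.toList)
      (by intro l' hl'; rcases List.mem_map.mp hl' with ⟨x, hx, rfl⟩; exact hfree x hx)]
  push_cast
  simp only [List.map_map]
  congr 1
  apply List.map_congr_left
  intro x hx
  simp only [Function.comp_apply]
  rw [PySem.Str.count_eq, count_eq_pvCnt _ _ hpat0]

-- splitlines.go unfolding equations
theorem slgo_nil (isB : Char → Bool) (cur : List Char) (acc : List (List Char)) :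
    PySem.Chars.splitlines.go isB [] cur acc
      = (if cur.isEmpty then acc.reverse else (cur.reverse :: acc).reverse) := by
  simp [PySem.Chars.splitlines.go]

theorem slgo_crlf (isB : Char → Bool) (rest cur : List Char) (acc : List (List Char)) :
    PySem.Chars.splitlines.go isB ('\r' :: '\n' :: rest) cur acc
      = PySem.Chars.splitlines.go isB rest [] (cur.reverse :: acc) := by
  simp [PySem.Chars.splitlines.go]

theorem slgo_single (isB : Char → Bool) (c : Char) (cur : List Char) (acc : List (List Char)) :
    PySem.Chars.splitlines.go isB [c] cur acc
      = (if isB c then PySem.Chars.splitlines.go isB [] [] (cur.reverse :: acc)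
         else PySem.Chars.splitlines.go isB [] (c :: cur) acc) := by
  simp [PySem.Chars.splitlines.go]

theorem slgo_cons_ne (isB : Char → Bool) (c c2 : Char) (rest cur : List Char)
    (acc : List (List Char)) (h : ¬(c = '\r' ∧ c2 = '\n')) :
    PySem.Chars.splitlines.go isB (c :: c2 :: rest) cur acc
      = (if isB c then PySem.Chars.splitlines.go isB (c2 :: rest) [] (cur.reverse :: acc)
         else PySem.Chars.splitlines.go isB (c2 :: rest) (c :: cur) acc) := by
  rw [PySem.Chars.splitlines.go]
  intro r h1 h2
  injection h2 with h3 _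
  exact h ⟨h1, h3⟩

theorem sl_go_free (isB : Char → Bool) (hnb : isB '\n' = true) :
    ∀ (n : Nat) (cs : List Char), cs.length ≤ n → ∀ (cur : List Char) (acc : List (List Char)),
      '\n' ∉ cur → (∀ l ∈ acc, '\n' ∉ l) →
      ∀ l ∈ PySem.Chars.splitlines.go isB cs cur acc, '\n' ∉ l := by
  intro n
  induction n with
  | zero =>
    intro cs hle cur acc hcur hacc l hl
    have : cs = [] := List.eq_nil_of_length_eq_zero (Nat.le_zero.mp hle)
    subst this
    rw [slgo_nil] at hl
    split at hl
    · exact hacc l (List.mem_reverse.mp hl)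
    · rcases List.mem_cons.mp (List.mem_reverse.mp hl) with rfl | h
      · simpa using hcur
      · exact hacc l h
  | succ n ih =>
    intro cs hle cur acc hcur hacc l hl
    cases cs with
    | nil =>
      rw [slgo_nil] at hl
      split at hl
      · exact hacc l (List.mem_reverse.mp hl)
      · rcases List.mem_cons.mp (List.mem_reverse.mp hl) with rfl | h
        · simpa using hcur
        · exact hacc l h
    | cons c rest =>
      have haccR : ∀ l' ∈ (cur.reverse :: acc), '\n' ∉ l' := by
        intro l' hl'
        rcases List.mem_cons.mp hl' with rfl | h
        · simpa using hcur
        · exact hacc l' h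
      cases rest with
      | nil =>
        rw [slgo_single] at hl
        split at hl
        · exact ih [] (by simp) [] _ (by simp) haccR l hl
        · rename_i hc
          refine ih [] (by simp) (c :: cur) acc ?_ hacc l hl
          intro hmem
          rcases List.mem_cons.mp hmem with h | h
          · exact hc (by rw [← h]; exact hnb)
          · exact hcur h
      | cons c2 rest2 =>
        by_cases hsp : c = '\r' ∧ c2 = '\n'
        · obtain ⟨h1, h2⟩ := hsp
          subst h1; subst h2
          rw [slgo_crlf] at hl
          refine ih rest2 ?_ [] _ (by simp) haccR l hl
          simp only [List.length_cons] at hle; omega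
        · rw [slgo_cons_ne isB c c2 rest2 cur acc hsp] at hl
          have hlen2 : (c2 :: rest2).length ≤ n := by
            simp only [List.length_cons] at hle ⊢; omega
          split at hl
          · exact ih (c2 :: rest2) hlen2 [] _ (by simp) haccR l hl
          · rename_i hc
            refine ih (c2 :: rest2) hlen2 (c :: cur) acc ?_ hacc l hl
            intro hmem
            rcases List.mem_cons.mp hmem with h | h
            · exact hc (by rw [← h]; exact hnb)
            · exact hcur h

theorem splitlines_free (cs : List Char) :
    ∀ l ∈ PySem.Chars.splitlines cs, '\n' ∉ l := by
  intro l hl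
  rw [PySem.Chars.splitlines] at hl
  exact sl_go_free _ (by decide) cs.length cs le_rfl [] [] (by simp) (by simp) l hl

-- A's enumerate search: the running index only shifts the result
theorem pvFindStart_shift (m v : String) :
    ∀ (ls : List String) (i : Nat),
      pvFindStart m v ls i = Option.map (· + i) (pvFindStart m v ls 0) := by
  intro ls
  induction ls with
  | nil => intro i; rfl
  | cons l t ih =>
    intro i
    rw [pvFindStart, pvFindStart]
    by_cases hc : (PySem.Str.isIn m l && PySem.Str.isIn v l) = true
    · rw [if_pos hc, if_pos hc]; simp
    · rw [if_neg hc, if_neg hc]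
      rw [ih (i + 1), ih 1, Option.map_map]
      congr 1
      funext k
      simp
      omega

-- a found start index points at a line containing version
theorem pvFindStart_mem (m v : String) :
    ∀ (ls : List String) (si : Nat), pvFindStart m v ls 0 = some si →
      ∃ l ∈ ls, PySem.Str.isIn v l = true := by
  intro ls
  induction ls with
  | nil => intro si h; exact absurd h (by rw [pvFindStart]; simp)
  | cons l t ih =>
    intro si h
    rw [pvFindStart] at h
    by_cases hc : (PySem.Str.isIn m l && PySem.Str.isIn v l) = true
    · rw [Bool.and_eq_true] at hc
      exact ⟨l, by simp, hc.2⟩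
    · rw [if_neg hc, pvFindStart_shift] at h
      cases hft : pvFindStart m v t 0 with
      | none => rw [hft] at h; exact absurd h (by simp)
      | some k =>
        rcases ih k hft with ⟨l', hl', hv⟩
        exact ⟨l', List.mem_cons_of_mem _ hl', hv⟩

-- the central bridge: B's reversed fold computes the total per-line sum and, as its snapshot,
-- the per-line sum over the suffix starting at A's start index
theorem pv_bridge (m pat v : String) :
    ∀ ls : List String,
      ls.reverse.foldl (pvRevStep m pat v) (0, none)
        = ((ls.map (fun l => (PySem.Str.count l pat : Int))).sum,
           match pvFindStart m v ls 0 with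
           | none => none
           | some si => some (((ls.drop si).map (fun l => (PySem.Str.count l pat : Int))).sum)) := by
  intro ls
  rw [List.foldl_reverse]
  induction ls with
  | nil => rfl
  | cons l t ih =>
    rw [List.foldr_cons, ih, pvFindStart]
    by_cases hc : (PySem.Str.isIn m l && PySem.Str.isIn v l) = true
    · rw [if_pos hc]
      simp only [pvRevStep, hc, if_true, List.drop_zero, List.map_cons, List.sum_cons,
        Prod.mk.injEq]
      exact ⟨by omega, by rw [Int.add_comm]⟩
    · have hcf : (PySem.Str.isIn m l && PySem.Str.isIn v l) = false := Bool.eq_false_iff.mpr hc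
      rw [if_neg hc, pvFindStart_shift m v t (0 + 1)]
      cases hft : pvFindStart m v t 0 with
      | none =>
        simp only [hft, Option.map_none, pvRevStep, hcf, Bool.false_eq_true, if_false,
          List.map_cons, List.sum_cons, Prod.mk.injEq]
        exact ⟨by omega, trivial⟩
      | some k =>
        simp only [hft, Option.map_some, pvRevStep, hcf, Bool.false_eq_true, if_false,
          List.map_cons, List.sum_cons, Prod.mk.injEq]
        refine ⟨by omega, ?_⟩
        have : k + (0 + 1) = k + 1 := by omega
        rw [this, List.drop_succ_cons]

-- ===== VERDICT (by name: the statement is the Claim_ definition above) =====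
theorem count_reproduction_after_adaptation_spec : Claim_equal_count_reproduction_after_adaptation := by
  intro log_text cve_id version _ hpre
  unfold Spec_count_reproduction_after_adaptation
  unfold count_reproduction_after_adaptation count_reproduction_after_adaptation_alt
  set m : String := "[Adapter] Start adapting exploit from" with hm
  set pat : String := "[Executor] Executing exploit for " ++ cve_id ++ " on version " ++ version ++ "..." with hpatdef
  have hfreelines : ∀ l ∈ PySem.Str.splitlines log_text, '\n' ∉ l.toList := by
    intro l hl
    have hmem : l.toList ∈ (PySem.Str.splitlines log_text).map String.toList :=
      List.mem_map_of_mem hl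
    rw [PySem.Str.splitlines_map_toList] at hmem
    exact splitlines_free _ _ hmem
  have hpat0 : pat.toList ≠ [] := by
    rw [hpatdef]
    simp [String.toList_append]
  simp only [pv_bridge m pat version (PySem.Str.splitlines log_text)]
  cases hft : pvFindStart m version (PySem.Str.splitlines log_text) 0 with
  | none => simp
  | some si =>
    have hnlpat : '\n' ∉ pat.toList := by
      rcases pvFindStart_mem m version _ si hft with ⟨l, hl, hvin⟩
      have hlfree := hfreelines l hl
      rw [hpatdef]
      simp only [String.toList_append, List.mem_append]
      push_neg
      refine ⟨⟨⟨⟨by decide, hpre⟩, by decide⟩, ?_⟩, by decide⟩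
      intro hmem
      have hinf : version.toList <:+: l.toList := (PySem.Str.isIn_iff_infix _ _).mp hvin
      exact hlfree (hinf.subset hmem)
    have hslice : PySem.List.slice (PySem.Str.splitlines log_text) (some ((si : Nat) : Int)) none
        = (PySem.Str.splitlines log_text).drop si := by
      rw [PySem.List.slice_from _ (by exact_mod_cast Int.natCast_nonneg si)]
      simp
    have hdfree : ∀ l ∈ (PySem.Str.splitlines log_text).drop si, '\n' ∉ l.toList :=
      fun l hl => hfreelines l (List.mem_of_mem_drop hl)
    simp only [hslice, count_join_eq_sum pat hpat0 hnlpat _ hdfree]
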